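-- pv_equiv track=rewrite | github.com/temig74/en_level_generator | olimp_gen2.py | generate_olimp_rows
-- ===== SOURCE A (Python) =====
-- def get_olimpgrid_id(row_num, col_num, olimp_height):
--     num = 0
--     for j in range(1, col_num + 1):
--         for i in range(1, 2**(olimp_height-1)+1):
--             if (i-1) % (2**(j-1)) == 0:
--                 num += 1
--             if i == row_num and j == col_num:
--                 return num
--
-- def generate_olimp_rows(olimp_height, row_pattern, level_number):
--     start_elems_count = 2**(olimp_height-1)
--     rows = ''
--     for i in range(1, start_elems_count+1):
--         rows += '<tr>'
--         for j in range(1, olimp_height+1):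
--             if (i-1) % (2**(j-1)) == 0:
--                 sector_number = get_olimpgrid_id(i, j, olimp_height)
--                 rowspan = 2**(j-1)
--                 rows += row_pattern.replace('{level_number}', str(level_number)).replace('{sector_number}', str(sector_number)).replace('{rowspan}', str(rowspan))
--         rows += '</tr>\n'
--     return rows
-- ===== SOURCE B (Python) =====
-- def generate_olimp_rows(olimp_height, row_pattern, level_number):
--     n = 2 ** (olimp_height - 1)
--     cell_base = row_pattern.replace('{level_number}', str(level_number))
--     rows = ''
--     for r in range(n):  # r = row index counted from 0
--         rows += '<tr>'
--         j = 0
--         step = 1      # rowspan of column j+1 = 2**j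
--         offset = 0    # sectors already assigned to columns 1..j
--         while j < olimp_height and r % step == 0:
--             rows += cell_base.replace('{sector_number}', str(offset + r // step + 1)).replace('{rowspan}', str(step))
--             offset += n // step
--             step *= 2
--             j += 1
--         rows += '</tr>\n'
--     return rows
-- ===== Notes on version B (the rewrite author's own statement) =====
-- stated objective: alternative
-- what changed: Each cell's sector id comes from a running per-column offset plus r//step instead of re-running get_olimpgrid_id's double loop over the whole grid for every cell, the column scan stops at the first non-dividing column instead of testing all olimp_height columns, and the {level_number} substitution is hoisted out of the loops.
import Mathlib
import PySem

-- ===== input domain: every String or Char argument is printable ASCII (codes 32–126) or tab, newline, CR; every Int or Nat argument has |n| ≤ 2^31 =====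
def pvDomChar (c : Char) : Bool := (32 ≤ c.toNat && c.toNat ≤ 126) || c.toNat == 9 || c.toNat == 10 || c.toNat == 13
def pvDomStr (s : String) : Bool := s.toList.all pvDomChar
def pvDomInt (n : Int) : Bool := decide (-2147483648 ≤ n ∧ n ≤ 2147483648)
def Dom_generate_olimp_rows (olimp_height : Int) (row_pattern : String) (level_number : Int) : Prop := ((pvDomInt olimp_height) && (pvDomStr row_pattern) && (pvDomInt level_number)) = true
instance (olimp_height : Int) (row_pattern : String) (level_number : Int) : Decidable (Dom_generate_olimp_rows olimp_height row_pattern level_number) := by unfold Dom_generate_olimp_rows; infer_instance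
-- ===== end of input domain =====

-- B replaces A's per-cell recount (get_olimpgrid_id re-scans the whole grid for every cell) by a
-- running per-column offset plus r // step, and stops the column scan at the first non-dividing
-- column.

-- ===== PORT A =====
-- 2**e for e ≥ 0 (every exponent A evaluates under Pre_ is ≥ 0)
def pvPow2 (e : Int) : Int := 2 ^ e.toNat

-- str(x) where x is the possibly-None result of get_olimpgrid_id
def pvStrOpt (o : Option Int) : String :=
  match o with
  | some v => PySem.Int.toStr v
  | none => "None"

-- the inner 'for i in range(1, 2**(olimp_height-1)+1)' loop of get_olimpgrid_id, with early return
def pvGidInner (row col j num : Int) (is : List Int) : Int ⊕ Int :=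
  match is with
  | [] => Sum.inl num
  | i :: rest =>
    let num' := if PySem.Int.mod (i - 1) (pvPow2 (j - 1)) = 0 then num + 1 else num
    if i = row ∧ j = col then Sum.inr num'
    else pvGidInner row col j num' rest

-- the outer 'for j in range(1, col_num+1)' loop of get_olimpgrid_id
def pvGidOuter (row col olimp_height num : Int) (js : List Int) : Option Int :=
  match js with
  | [] => none
  | j :: rest =>
    match pvGidInner row col j num (PySem.List.pyRange 1 (pvPow2 (olimp_height - 1) + 1) 1) with
    | Sum.inr v => some v
    | Sum.inl num' => pvGidOuter row col olimp_height num' rest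

def get_olimpgrid_id (row_num col_num olimp_height : Int) : Option Int :=
  pvGidOuter row_num col_num olimp_height 0 (PySem.List.pyRange 1 (col_num + 1) 1)

-- body of A's inner 'for j in range(1, olimp_height+1)' loop
def pvInnerBody (olimp_height : Int) (row_pattern : String) (level_number : Int) (i : Int) (rows : String) (j : Int) : String :=
  if PySem.Int.mod (i - 1) (pvPow2 (j - 1)) = 0 then
    rows ++ PySem.Str.replace (PySem.Str.replace (PySem.Str.replace row_pattern "{level_number}" (PySem.Int.toStr level_number)) "{sector_number}" (pvStrOpt (get_olimpgrid_id i j olimp_height))) "{rowspan}" (PySem.Int.toStr (pvPow2 (j - 1)))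
  else rows

-- body of A's outer 'for i in range(1, start_elems_count+1)' loop
def pvRowBody (olimp_height : Int) (row_pattern : String) (level_number : Int) (rows : String) (i : Int) : String :=
  ((PySem.List.pyRange 1 (olimp_height + 1) 1).foldl (pvInnerBody olimp_height row_pattern level_number i) (rows ++ "<tr>")) ++ "</tr>\n"

def generate_olimp_rows (olimp_height : Int) (row_pattern : String) (level_number : Int) : String :=
  let start_elems_count := pvPow2 (olimp_height - 1)
  (PySem.List.pyRange 1 (start_elems_count + 1) 1).foldl (pvRowBody olimp_height row_pattern level_number) ""

-- ===== PORT B =====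
-- B's 'while j < olimp_height and r % step == 0' loop
def pvAltWhile (cell : String) (n olimp_height r j step offset : Int) (rows : String) : String :=
  if h : j < olimp_height ∧ PySem.Int.mod r step = 0 then
    pvAltWhile cell n olimp_height r (j + 1) (step * 2) (offset + PySem.Int.floordiv n step)
      (rows ++ PySem.Str.replace (PySem.Str.replace cell "{sector_number}" (PySem.Int.toStr (offset + PySem.Int.floordiv r step + 1))) "{rowspan}" (PySem.Int.toStr step))
  else rows
termination_by (olimp_height - j).toNat
decreasing_by omega

-- body of B's 'for r in range(n)' loop
def pvAltRowBody (cell : String) (n olimp_height : Int) (rows : String) (r : Int) : String :=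
  pvAltWhile cell n olimp_height r 0 1 0 (rows ++ "<tr>") ++ "</tr>\n"

def generate_olimp_rows_alt (olimp_height : Int) (row_pattern : String) (level_number : Int) : String :=
  let n := pvPow2 (olimp_height - 1)
  let cell_base := PySem.Str.replace row_pattern "{level_number}" (PySem.Int.toStr level_number)
  (PySem.List.pyRange 0 n 1).foldl (pvAltRowBody cell_base n olimp_height) ""

-- ===== PRECONDITION & SPEC =====
-- A raises TypeError for olimp_height ≤ 0: 2**(olimp_height-1) is then a float and range() rejects it.
def Pre_generate_olimp_rows (olimp_height : Int) (row_pattern : String) (level_number : Int) : Prop :=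
  1 ≤ olimp_height
instance (olimp_height : Int) (row_pattern : String) (level_number : Int) : Decidable (Pre_generate_olimp_rows olimp_height row_pattern level_number) := by unfold Pre_generate_olimp_rows; infer_instance

def pvWitness_generate_olimp_rows : Int × String × Int := (2, "s{sector_number}r{rowspan}l{level_number};", 5)

def Spec_generate_olimp_rows (olimp_height : Int) (row_pattern : String) (level_number : Int) (out : String) : Prop := out = generate_olimp_rows_alt olimp_height row_pattern level_number
instance (olimp_height : Int) (row_pattern : String) (level_number : Int) (out : String) : Decidable (Spec_generate_olimp_rows olimp_height row_pattern level_number out) := by unfold Spec_generate_olimp_rows; infer_instance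

-- ===== CLAIM (what is proved, stated in full; the proofs are below) =====
def Claim_equal_generate_olimp_rows : Prop := ∀ (olimp_height : Int) (row_pattern : String) (level_number : Int), Dom_generate_olimp_rows olimp_height row_pattern level_number → Pre_generate_olimp_rows olimp_height row_pattern level_number → Spec_generate_olimp_rows olimp_height row_pattern level_number (generate_olimp_rows olimp_height row_pattern level_number)

-- ===== LEMMAS AND PROOFS =====

lemma pv_pow2_coe (k : Nat) : pvPow2 (k : Int) = (2:Int)^k := by simp [pvPow2]

lemma pv_foldl_id {α β : Type} (f : β → α → β) (l : List α)
    (hf : ∀ x ∈ l, ∀ acc, f acc x = acc) : ∀ s, l.foldl f s = s := by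
  induction l with
  | nil => intro s; rfl
  | cons x t ih =>
    intro s
    rw [List.foldl_cons, hf x (by simp)]
    exact ih (fun y hy acc => hf y (by simp [hy]) acc) s

lemma pv_inner_nohit (row col j num : Int) (is : List Int)
    (hno : ∀ i ∈ is, ¬(i = row ∧ j = col)) :
    pvGidInner row col j num is
      = Sum.inl (num + (is.countP (fun i => decide (PySem.Int.mod (i - 1) (pvPow2 (j - 1)) = 0)) : Int)) := by
  induction is generalizing num with
  | nil => simp [pvGidInner]
  | cons i rest ih =>
    have h1 : ¬(i = row ∧ j = col) := hno i (by simp)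
    rw [pvGidInner]
    simp only [h1, if_false]
    rw [ih _ (fun y hy => hno y (by simp [hy])), List.countP_cons]
    by_cases hm : PySem.Int.mod (i - 1) (pvPow2 (j - 1)) = 0
    · simp only [hm, if_true, decide_true]
      push_cast
      ring_nf
    · simp only [hm, if_false, decide_false]
      push_cast
      ring_nf

lemma pv_inner_hit (row col num : Int) (xs ys : List Int)
    (hno : ∀ i ∈ xs, i ≠ row) :
    pvGidInner row col col num (xs ++ row :: ys)
      = Sum.inr (num + (xs.countP (fun i => decide (PySem.Int.mod (i - 1) (pvPow2 (col - 1)) = 0)) : Int)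
          + (if PySem.Int.mod (row - 1) (pvPow2 (col - 1)) = 0 then 1 else 0)) := by
  induction xs generalizing num with
  | nil =>
    rw [List.nil_append, pvGidInner]
    simp only [and_self, if_true, List.countP_nil]
    by_cases hm : PySem.Int.mod (row - 1) (pvPow2 (col - 1)) = 0
    · simp [hm]
    · simp [hm]
  | cons x t ih =>
    have hx : ¬(x = row ∧ col = col) := by
      intro h; exact (hno x (by simp)) h.1
    rw [List.cons_append, pvGidInner]
    rw [if_neg hx]
    rw [ih _ (fun y hy => hno y (by simp [hy])), List.countP_cons]
    by_cases hm : PySem.Int.mod (x - 1) (pvPow2 (col - 1)) = 0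
    · simp only [hm, if_true, decide_true]
      congr 1 <;> push_cast <;> ring_nf
    · simp only [hm, if_false, decide_false]
      congr 1 <;> push_cast <;> ring_nf

lemma pv_cnt_range (m q : Nat) (hq : 0 < q) :
    (PySem.List.pyRange 1 ((m : Int) + 1) 1).countP (fun i => decide (PySem.Int.mod (i - 1) (q : Int) = 0))
      = m / q + (if q ∣ m then 0 else 1) := by
  induction m with
  | zero =>
    simp [PySem.List.pyRange_one_eq_nil (by norm_num : ((0:Nat):Int) + 1 ≤ 1)]
  | succ m ih =>
    have hsplit : PySem.List.pyRange 1 (((m + 1 : Nat) : Int) + 1) 1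
        = PySem.List.pyRange 1 ((m : Int) + 1) 1 ++ [(m : Int) + 1] := by
      have h := PySem.List.pyRange_one_succ_right (a := (1:Int)) (b := (m : Int) + 1) (by omega)
      push_cast
      exact h
    rw [hsplit, List.countP_append, ih]
    have hpred : (List.countP (fun i => decide (PySem.Int.mod (i - 1) (q : Int) = 0)) [(m : Int) + 1])
        = if q ∣ m then 1 else 0 := by
      have e1 : ((m : Int) + 1) - 1 = (m : Int) := by ring
      simp only [List.countP_cons, List.countP_nil, e1]
      have e2 : PySem.Int.mod (m : Int) (q : Int) = 0 ↔ q ∣ m := by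
        rw [PySem.Int.mod_eq_zero_iff_dvd]
        exact Int.natCast_dvd_natCast
      by_cases hd : q ∣ m
      · simp [hd]; exact_mod_cast hd
      · simp [hd]; exact fun hcon => hd (by exact_mod_cast hcon)
    rw [hpred, Nat.succ_div]
    by_cases hd1 : q ∣ m + 1 <;> by_cases hd2 : q ∣ m <;> simp [hd1, hd2]

lemma pv_pow_sub_helper (H e : Nat) (he : e ≤ H) :
    PySem.Int.floordiv ((2:Int)^H) ((2:Int)^e) = (2:Int)^(H - e) := by
  rw [PySem.Int.floordiv_eq_ediv_of_pos (by positivity)]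
  have h : (2:Int)^H = (2:Int)^(H - e) * (2:Int)^e := by
    rw [← pow_add, Nat.sub_add_cancel he]
  rw [h, Int.mul_ediv_cancel _ (by positivity)]

lemma pv_outer (H c : Nat) (row : Int) (hc : c ≤ H) (h1 : 1 ≤ row) (h2 : row ≤ (2:Int)^H)
    (hd : ((2:Int)^c) ∣ (row - 1)) :
    ∀ (k : Nat) (num : Int), k ≤ c →
    pvGidOuter row ((c : Int) + 1) ((H : Int) + 1) num (PySem.List.pyRange ((c : Int) + 1 - (k : Int)) ((c : Int) + 2) 1)
      = some (num + ((2:Int)^((H - c) + k + 1) - (2:Int)^((H - c) + 1)) + (row - 1) / ((2:Int)^c) + 1) := by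
  have hpowH : pvPow2 (((H : Int) + 1) - 1) = (2:Int)^H := by
    rw [show ((H : Int) + 1) - 1 = (H : Int) by ring, pv_pow2_coe]
  have hcastH : ((2:Int)^H) = (((2^H : Nat) : Int)) := by push_cast; ring
  intro k
  induction k with
  | zero =>
    intro num _
    have e1 : (c : Int) + 1 - ((0 : Nat) : Int) = (c : Int) + 1 := by push_cast; ring
    have e2 : (c : Int) + 2 = ((c : Int) + 1) + 1 := by ring
    rw [e1, e2, PySem.List.pyRange_one_singleton, pvGidOuter, hpowH]
    set m : Nat := (row - 1).toNat with hm
    have hrow : row = (m : Int) + 1 := by omega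
    have hsplit : PySem.List.pyRange 1 ((2:Int)^H + 1) 1
        = PySem.List.pyRange 1 row 1 ++ (row :: PySem.List.pyRange (row + 1) ((2:Int)^H + 1) 1) := by
      rw [PySem.List.pyRange_one_append 1 row ((2:Int)^H + 1) h1 (by linarith),
        PySem.List.pyRange_one_cons (a := row) (b := (2:Int)^H + 1) (by linarith)]
    rw [hsplit, pv_inner_hit row ((c : Int) + 1) num _ _
      (fun i hi => by
        have := (PySem.List.mem_pyRange_one).1 hi
        omega)]
    have epc : pvPow2 (((c : Int) + 1) - 1) = (((2^c : Nat)) : Int) := by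
      rw [show ((c : Int) + 1) - 1 = (c : Int) by ring, pv_pow2_coe]; push_cast; ring
    have hdn : (2^c : Nat) ∣ m := by
      have : ((2^c : Nat) : Int) ∣ (m : Int) := by
        push_cast; rw [show (m : Int) = row - 1 by omega]; exact hd
      exact_mod_cast this
    have hcnt : (PySem.List.pyRange 1 row 1).countP
        (fun i => decide (PySem.Int.mod (i - 1) (pvPow2 (((c : Int) + 1) - 1)) = 0)) = m / 2^c := by
      rw [show PySem.List.pyRange 1 row 1 = PySem.List.pyRange 1 ((m : Int) + 1) 1 by rw [← hrow]]
      simp only [epc]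
      rw [pv_cnt_range m (2^c) (by positivity)]
      simp [hdn]
    have hmod : PySem.Int.mod (row - 1) (pvPow2 (((c : Int) + 1) - 1)) = 0 := by
      rw [epc, PySem.Int.mod_eq_zero_iff_dvd]
      push_cast; exact hd
    rw [hcnt, if_pos hmod]
    have hdivcast : ((m / 2^c : Nat) : Int) = (row - 1) / ((2:Int)^c) := by
      obtain ⟨t, ht⟩ := hdn
      rw [ht, Nat.mul_div_cancel_left t (by positivity)]
      have hrw : row - 1 = ((2:Int)^c) * (t : Int) := by
        rw [show row - 1 = (m : Int) by omega, ht]; push_cast; ring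
      rw [hrw, Int.mul_ediv_cancel_left _ (by positivity)]
    simp only [hdivcast]
    congr 1
    ring
  | succ k ih =>
    intro num hk1
    have hklec : k ≤ c := by omega
    have e1 : (c : Int) + 1 - ((k + 1 : Nat) : Int) = ((c : Int) - (k : Int)) := by push_cast; ring
    rw [e1, PySem.List.pyRange_one_cons (by push_cast; omega)]
    have e2 : (c : Int) - (k : Int) + 1 = (c : Int) + 1 - (k : Int) := by ring
    rw [e2, pvGidOuter, hpowH]
    have hnohit : ∀ i ∈ PySem.List.pyRange 1 ((2:Int)^H + 1) 1, ¬(i = row ∧ (c : Int) - (k : Int) = (c : Int) + 1) := by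
      intro i _ habs
      have := habs.2
      omega
    rw [pv_inner_nohit row ((c : Int) + 1) ((c : Int) - (k : Int)) num _ hnohit]
    have epc : pvPow2 (((c : Int) - (k : Int)) - 1) = (((2^(c - (k + 1)) : Nat)) : Int) := by
      rw [show ((c : Int) - (k : Int)) - 1 = ((c - (k + 1) : Nat) : Int) by push_cast; omega, pv_pow2_coe]
      push_cast; ring
    have hcnt : (PySem.List.pyRange 1 ((2:Int)^H + 1) 1).countP
        (fun i => decide (PySem.Int.mod (i - 1) (pvPow2 (((c : Int) - (k : Int)) - 1)) = 0))
        = 2^((H - c) + k + 1) := by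
      simp only [epc]
      rw [show ((2:Int)^H + 1) = (((2^H : Nat) : Int) + 1) by push_cast; ring]
      rw [pv_cnt_range (2^H) (2^(c - (k + 1))) (by positivity)]
      rw [if_pos (pow_dvd_pow 2 (by omega))]
      rw [Nat.pow_div (by omega) (by omega), show H - (c - (k + 1)) = (H - c) + k + 1 by omega]
      omega
    rw [hcnt]
    change pvGidOuter row ((c : Int) + 1) ((H : Int) + 1) (num + ((2^((H - c) + k + 1) : Nat) : Int))
      (PySem.List.pyRange ((c : Int) + 1 - (k : Int)) ((c : Int) + 2) 1) = _
    rw [ih (num + (2^((H - c) + k + 1) : Nat)) hklec]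
    congr 1
    push_cast
    rw [show (H - c) + (k + 1) + 1 = ((H - c) + k + 1) + 1 by omega, pow_succ]
    ring

lemma pv_gid (H c : Nat) (row : Int) (hc : c ≤ H) (h1 : 1 ≤ row) (h2 : row ≤ (2:Int)^H)
    (hd : ((2:Int)^c) ∣ (row - 1)) :
    get_olimpgrid_id row ((c : Int) + 1) ((H : Int) + 1)
      = some ((2:Int)^(H + 1) - (2:Int)^((H - c) + 1) + (row - 1) / ((2:Int)^c) + 1) := by
  have h0 := pv_outer H c row hc h1 h2 hd c 0 le_rfl
  rw [show (c : Int) + 1 - (c : Int) = 1 by ring] at h0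
  unfold get_olimpgrid_id
  rw [show ((c : Int) + 1) + 1 = (c : Int) + 2 by ring]
  rw [h0]
  congr 2
  rw [show (H - c) + c + 1 = H + 1 by omega]
  ring

lemma pv_row (H : Nat) (pat : String) (lvl : Int) (row : Int) (h1 : 1 ≤ row) (h2 : row ≤ (2:Int)^H) :
    ∀ (d j₀ : Nat) (s : String), j₀ + d = H + 1 →
    (PySem.List.pyRange ((j₀ : Int) + 1) (((H : Int) + 1) + 1) 1).foldl (pvInnerBody ((H : Int) + 1) pat lvl row) s
      = pvAltWhile (PySem.Str.replace pat "{level_number}" (PySem.Int.toStr lvl)) ((2:Int)^H) ((H : Int) + 1)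
          (row - 1) (j₀ : Int) ((2:Int)^j₀) ((2:Int)^(H + 1) - (2:Int)^(H + 1 - j₀)) s := by
  intro d
  induction d with
  | zero =>
    intro j₀ s hj
    have hj0 : j₀ = H + 1 := by omega
    subst hj0
    rw [PySem.List.pyRange_one_eq_nil (by push_cast; omega), List.foldl_nil, pvAltWhile,
      dif_neg (by
        intro hcon
        have := hcon.1
        push_cast at this
        omega)]
  | succ d ih =>
    intro j₀ s hsum
    have hle : j₀ ≤ H := by omega
    rw [PySem.List.pyRange_one_cons (by push_cast; omega), List.foldl_cons]
    have hpj : pvPow2 (((j₀ : Int) + 1) - 1) = (2:Int)^j₀ := by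
      rw [show ((j₀ : Int) + 1) - 1 = (j₀ : Int) by ring, pv_pow2_coe]
    by_cases hdvd : ((2:Int)^j₀) ∣ (row - 1)
    · have hmod : PySem.Int.mod (row - 1) ((2:Int)^j₀) = 0 :=
        (PySem.Int.mod_eq_zero_iff_dvd _ _).2 hdvd
      have hstepA : pvInnerBody ((H : Int) + 1) pat lvl row s ((j₀ : Int) + 1)
          = s ++ PySem.Str.replace (PySem.Str.replace (PySem.Str.replace pat "{level_number}" (PySem.Int.toStr lvl))
              "{sector_number}" (PySem.Int.toStr ((2:Int)^(H + 1) - (2:Int)^(H + 1 - j₀) + PySem.Int.floordiv (row - 1) ((2:Int)^j₀) + 1)))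
              "{rowspan}" (PySem.Int.toStr ((2:Int)^j₀)) := by
        unfold pvInnerBody
        rw [hpj, if_pos hmod, pv_gid H j₀ row hle h1 h2 hdvd]
        simp only [pvStrOpt]
        congr 3
        rw [PySem.Int.floordiv_eq_ediv_of_pos (by positivity)]
        rw [show H + 1 - j₀ = (H - j₀) + 1 by omega]
      rw [hstepA]
      conv_rhs => rw [pvAltWhile]
      rw [dif_pos ⟨by push_cast; omega, hmod⟩]
      have hstep2 : (2:Int)^j₀ * 2 = (2:Int)^(j₀ + 1) := by rw [pow_succ]
      have hoff : (2:Int)^(H + 1) - (2:Int)^(H + 1 - j₀) + PySem.Int.floordiv ((2:Int)^H) ((2:Int)^j₀)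
          = (2:Int)^(H + 1) - (2:Int)^(H - j₀) := by
        rw [pv_pow_sub_helper H j₀ hle]
        rw [show H + 1 - j₀ = (H - j₀) + 1 by omega, pow_succ]
        ring
      rw [hstep2, hoff]
      have := ih (j₀ + 1)
        (s ++ PySem.Str.replace (PySem.Str.replace (PySem.Str.replace pat "{level_number}" (PySem.Int.toStr lvl))
          "{sector_number}" (PySem.Int.toStr ((2:Int)^(H + 1) - (2:Int)^(H + 1 - j₀) + PySem.Int.floordiv (row - 1) ((2:Int)^j₀) + 1)))
          "{rowspan}" (PySem.Int.toStr ((2:Int)^j₀)))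
        (by omega)
      simpa [show H + 1 - (j₀ + 1) = H - j₀ by omega] using this
    · have hmod : ¬ PySem.Int.mod (row - 1) ((2:Int)^j₀) = 0 := fun hcon =>
        hdvd ((PySem.Int.mod_eq_zero_iff_dvd _ _).1 hcon)
      have hstepA : pvInnerBody ((H : Int) + 1) pat lvl row s ((j₀ : Int) + 1) = s := by
        unfold pvInnerBody
        rw [hpj, if_neg hmod]
      rw [hstepA, pvAltWhile, dif_neg (fun hcon => hmod hcon.2)]
      apply pv_foldl_id
      intro j hj acc
      have hmem := (PySem.List.mem_pyRange_one).1 hj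
      unfold pvInnerBody
      rw [if_neg]
      intro hcon
      apply hdvd
      have hdj : pvPow2 (j - 1) ∣ (row - 1) := by
        rw [← PySem.Int.mod_eq_zero_iff_dvd]
        exact hcon
      refine dvd_trans ?_ hdj
      unfold pvPow2
      exact pow_dvd_pow 2 (by omega)

lemma pv_rows (H : Nat) (pat : String) (lvl : Int) :
    ∀ (d a : Nat) (s : String), a + d = 2^H →
    (PySem.List.pyRange ((a : Int) + 1) ((2:Int)^H + 1) 1).foldl (pvRowBody ((H : Int) + 1) pat lvl) s
      = (PySem.List.pyRange (a : Int) ((2:Int)^H) 1).foldl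
          (pvAltRowBody (PySem.Str.replace pat "{level_number}" (PySem.Int.toStr lvl)) ((2:Int)^H) ((H : Int) + 1)) s := by
  intro d
  have hcast : ((2^H : Nat) : Int) = (2:Int)^H := by push_cast; ring
  induction d with
  | zero =>
    intro a s ha
    rw [PySem.List.pyRange_one_eq_nil (by omega), PySem.List.pyRange_one_eq_nil (by omega)]
    rfl
  | succ d ih =>
    intro a s ha
    have halt : (a : Int) < (2:Int)^H := by omega
    rw [PySem.List.pyRange_one_cons (by omega), List.foldl_cons,
      PySem.List.pyRange_one_cons halt, List.foldl_cons]
    have hrow := pv_row H pat lvl ((a : Int) + 1) (by omega) (by omega) (H + 1) 0 (s ++ "<tr>") (by omega)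
    have hhead : pvRowBody ((H : Int) + 1) pat lvl s ((a : Int) + 1)
        = pvAltRowBody (PySem.Str.replace pat "{level_number}" (PySem.Int.toStr lvl)) ((2:Int)^H) ((H : Int) + 1) s (a : Int) := by
      unfold pvRowBody pvAltRowBody
      congr 1
      have h0 : (((0 : Nat) : Int) + 1) = (1 : Int) := by norm_num
      rw [h0] at hrow
      rw [hrow]
      norm_num
    rw [hhead]
    have := ih (a + 1) (pvAltRowBody (PySem.Str.replace pat "{level_number}" (PySem.Int.toStr lvl)) ((2:Int)^H) ((H : Int) + 1) s (a : Int)) (by omega)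
    push_cast at this
    exact this

-- ===== VERDICT (by name: the statement is the Claim_ definition above) =====
theorem generate_olimp_rows_spec : Claim_equal_generate_olimp_rows := by
  intro h pat lvl _ hpre
  unfold Pre_generate_olimp_rows at hpre
  unfold Spec_generate_olimp_rows generate_olimp_rows generate_olimp_rows_alt
  have hH : h = (((h - 1).toNat : Int)) + 1 := by omega
  set H := (h - 1).toNat with hHdef
  rw [hH]
  have hpow : pvPow2 (((H : Int) + 1) - 1) = (2:Int)^H := by
    simp [pvPow2]
  rw [hpow]
  have := pv_rows H pat lvl (2^H) 0 "" (by omega)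
  simpa using this
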